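-- pv_equiv track=rewrite | github.com/hbreiner/CSP---Caso-Sudoku | RESOLUTOR.py | definir_restricciones_cajas
-- ===== SOURCE A (Python) =====
-- def definir_restricciones_cajas(id_cols_str, valores_dominio):
--     todas_las_cajas = []
--     lista_id_cols = list(id_cols_str)
--     for inicio_fila in range(1, 10, 3): # 1, 4, 7
--         for inicio_idx_col in range(0, 9, 3): # 0, 3, 6 (índices para lista_id_cols)
--             variables_caja = []
--             for i in range(3): # Desplazamiento en fila para la caja
--                 for j in range(3): # Desplazamiento en columna para la caja
--                     fila = inicio_fila + i
--                     col_char = lista_id_cols[inicio_idx_col + j]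
--                     variables_caja.append(f"{col_char}{fila}")
--             todas_las_cajas.append(variables_caja)
--     return todas_las_cajas
-- ===== SOURCE B (Python) =====
-- def definir_restricciones_cajas(id_cols_str, valores_dominio):
--     lista_id_cols = list(id_cols_str)
--     todas_las_cajas = [[] for _ in range(9)]
--     for fila in range(1, 10):
--         for col_idx in range(9):
--             caja = ((fila - 1) // 3) * 3 + col_idx // 3
--             todas_las_cajas[caja].append(f"{lista_id_cols[col_idx]}{fila}")
--     return todas_las_cajas
-- ===== Notes on version B (the rewrite author's own statement) =====
-- stated objective: simpler
-- what changed: Replaces A's four nested loops (band, box-column, row-offset, col-offset) by a single row-major double loop over all 81 cells that buckets each cell into one of 9 pre-allocated box lists via the index formula ((fila-1)//3)*3 + col//3.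
import Mathlib
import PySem

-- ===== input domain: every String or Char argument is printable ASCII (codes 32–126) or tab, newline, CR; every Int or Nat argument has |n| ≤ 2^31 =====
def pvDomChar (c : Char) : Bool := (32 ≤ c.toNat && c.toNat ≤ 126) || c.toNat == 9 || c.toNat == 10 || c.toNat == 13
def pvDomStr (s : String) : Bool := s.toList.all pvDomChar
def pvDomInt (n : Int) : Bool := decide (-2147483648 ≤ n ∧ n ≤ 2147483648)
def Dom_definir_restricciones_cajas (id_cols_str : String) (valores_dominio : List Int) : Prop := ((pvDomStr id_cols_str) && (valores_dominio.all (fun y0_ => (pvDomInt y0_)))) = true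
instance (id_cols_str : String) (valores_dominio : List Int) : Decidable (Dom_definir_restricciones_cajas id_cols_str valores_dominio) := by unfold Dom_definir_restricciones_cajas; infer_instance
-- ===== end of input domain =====

-- B replaces A's four nested band/offset loops by one row-major double loop over all 81 cells
-- that buckets each cell into 9 pre-allocated box lists (objective: simpler).

-- ===== PORT A =====
-- Literal port of A: four nested loops; lista_id_cols[inicio_idx_col + j] is an indexing that
-- raises IndexError in Python when out of range; Pre_ guarantees it is in range, the .getD ' '
-- default is never reached on admitted inputs.
def definir_restricciones_cajas (id_cols_str : String) (valores_dominio : List Int) : List (List String) :=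
  let lista_id_cols := id_cols_str.toList
  (PySem.List.pyRange 1 10 3).foldl (fun todas_las_cajas inicio_fila =>
    (PySem.List.pyRange 0 9 3).foldl (fun todas_las_cajas inicio_idx_col =>
      let variables_caja :=
        (PySem.List.pyRange 0 3 1).foldl (fun vc i =>
          (PySem.List.pyRange 0 3 1).foldl (fun vc j =>
            let fila := inicio_fila + i
            let col_char := (PySem.List.pyGet? lista_id_cols (inicio_idx_col + j)).getD ' '
            vc ++ [String.ofList [col_char] ++ PySem.Int.toStr fila]) vc) []
      todas_las_cajas ++ [variables_caja]) todas_las_cajas) []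

-- ===== PORT B =====
-- Literal port of B: 9 pre-allocated empty buckets, one row-major double loop, bucket index
-- ((fila-1)//3)*3 + col_idx//3; same .getD ' ' note as for A (in range under Pre_).
def definir_restricciones_cajas_alt (id_cols_str : String) (valores_dominio : List Int) : List (List String) :=
  let lista_id_cols := id_cols_str.toList
  (PySem.List.pyRange 1 10 1).foldl (fun todas fila =>
    (PySem.List.pyRange 0 9 1).foldl (fun todas col_idx =>
      let caja := (PySem.Int.floordiv (fila - 1) 3) * 3 + PySem.Int.floordiv col_idx 3
      let ch := (PySem.List.pyGet? lista_id_cols col_idx).getD ' '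
      todas.modify caja.toNat (fun l => l ++ [String.ofList [ch] ++ PySem.Int.toStr fila])) todas)
    (List.replicate 9 [])

-- ===== PRECONDITION & SPEC =====
-- Pre_ excludes strings shorter than 9 characters, on which A raises IndexError.
def Pre_definir_restricciones_cajas (id_cols_str : String) (valores_dominio : List Int) : Prop :=
  9 ≤ id_cols_str.toList.length
instance (id_cols_str : String) (valores_dominio : List Int) : Decidable (Pre_definir_restricciones_cajas id_cols_str valores_dominio) := by unfold Pre_definir_restricciones_cajas; infer_instance
def pvWitness_definir_restricciones_cajas : String × List Int := ("ABCDEFGHI", [1, 2])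

def Spec_definir_restricciones_cajas (id_cols_str : String) (valores_dominio : List Int) (out : List (List String)) : Prop := out = definir_restricciones_cajas_alt id_cols_str valores_dominio
instance (id_cols_str : String) (valores_dominio : List Int) (out : List (List String)) : Decidable (Spec_definir_restricciones_cajas id_cols_str valores_dominio out) := by unfold Spec_definir_restricciones_cajas; infer_instance

-- ===== CLAIM (what is proved, stated in full; the proofs are below) =====
def Claim_equal_definir_restricciones_cajas : Prop := ∀ (id_cols_str : String) (valores_dominio : List Int), Dom_definir_restricciones_cajas id_cols_str valores_dominio → Pre_definir_restricciones_cajas id_cols_str valores_dominio → Spec_definir_restricciones_cajas id_cols_str valores_dominio (definir_restricciones_cajas id_cols_str valores_dominio)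

-- ===== LEMMAS AND PROOFS =====
-- Any list of length ≥ 9 starts with 9 explicit characters.
lemma exists_nine_chars (l : List Char) (h : 9 ≤ l.length) :
    ∃ c0 c1 c2 c3 c4 c5 c6 c7 c8 rest,
      l = c0 :: c1 :: c2 :: c3 :: c4 :: c5 :: c6 :: c7 :: c8 :: rest := by
  match l with
  | c0 :: c1 :: c2 :: c3 :: c4 :: c5 :: c6 :: c7 :: c8 :: rest =>
    exact ⟨c0, c1, c2, c3, c4, c5, c6, c7, c8, rest, rfl⟩

-- With the first 9 characters explicit, both programs evaluate to the same literal output.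
lemma both_eq_on_cons (c0 c1 c2 c3 c4 c5 c6 c7 c8 : Char) (rest : List Char)
    (vd : List Int) (s : String)
    (hs : s.toList = c0 :: c1 :: c2 :: c3 :: c4 :: c5 :: c6 :: c7 :: c8 :: rest) :
    definir_restricciones_cajas s vd = definir_restricciones_cajas_alt s vd := by
  have r1 : PySem.List.pyRange 1 10 3 = [1, 4, 7] := by decide
  have r2 : PySem.List.pyRange 0 9 3 = [0, 3, 6] := by decide
  have r3 : PySem.List.pyRange 0 3 1 = [0, 1, 2] := by decide
  have r4 : PySem.List.pyRange 1 10 1 = [1, 2, 3, 4, 5, 6, 7, 8, 9] := by decide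
  have r5 : PySem.List.pyRange 0 9 1 = [0, 1, 2, 3, 4, 5, 6, 7, 8] := by decide
  have g : ∀ (k : Nat), k < 9 →
      PySem.List.pyGet? (c0 :: c1 :: c2 :: c3 :: c4 :: c5 :: c6 :: c7 :: c8 :: rest) (k : Int)
        = some ([c0, c1, c2, c3, c4, c5, c6, c7, c8].getD k ' ') := by
    intro k hk
    rw [PySem.List.pyGet?_natCast]
    interval_cases k <;> rfl
  have g0 := g 0 (by omega); have g1 := g 1 (by omega); have g2 := g 2 (by omega)
  have g3 := g 3 (by omega); have g4 := g 4 (by omega); have g5 := g 5 (by omega)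
  have g6 := g 6 (by omega); have g7 := g 7 (by omega); have g8 := g 8 (by omega)
  norm_num at g0 g1 g2 g3 g4 g5 g6 g7 g8
  simp only [definir_restricciones_cajas, definir_restricciones_cajas_alt, hs,
    r1, r2, r3, r4, r5, List.foldl]
  norm_num [g0, g1, g2, g3, g4, g5, g6, g7, g8]
  rfl

-- ===== VERDICT (by name: the statement is the Claim_ definition above) =====
theorem definir_restricciones_cajas_spec : Claim_equal_definir_restricciones_cajas := by
  intro s vd _ hpre
  obtain ⟨c0, c1, c2, c3, c4, c5, c6, c7, c8, rest, hs⟩ := exists_nine_chars s.toList hpre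
  exact both_eq_on_cons c0 c1 c2 c3 c4 c5 c6 c7 c8 rest vd s hs
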